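-- pv_equiv track=rewrite | github.com/justanothercell/AdventOfCode | AOC-2022/day25/1/main.py | snafu_dec
-- ===== SOURCE A (Python) =====
-- def snafu_dec(s):
--     n = 0
--     for i, c in enumerate(s[::-1]):
--         match c:
--             case '2':
--                 n += 5 ** i * 2
--             case '1':
--                 n += 5 ** i
--             case '0':
--                 pass
--             case '-':
--                 n -= 5 ** i
--             case '=':
--                 n -= 5 ** i * 2
--     return n
-- ===== SOURCE B (Python) =====
-- SNAFU_DIGITS = {'2': 2, '1': 1, '0': 0, '-': -1, '=': -2}
--
-- def snafu_dec(s):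
--     n = 0
--     for c in s:
--         n = n * 5 + SNAFU_DIGITS.get(c, 0)
--     return n
-- ===== Notes on version B (the rewrite author's own statement) =====
-- stated objective: alternative
-- what changed: Replaces the reversed-enumerate loop that recomputes a bigint power 5**i per character with a forward Horner scan n = n*5 + digit (digits looked up in a table); measured 1.48x at the largest timed size, below the 1.5x bar, so no speed is claimed.
import Mathlib
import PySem

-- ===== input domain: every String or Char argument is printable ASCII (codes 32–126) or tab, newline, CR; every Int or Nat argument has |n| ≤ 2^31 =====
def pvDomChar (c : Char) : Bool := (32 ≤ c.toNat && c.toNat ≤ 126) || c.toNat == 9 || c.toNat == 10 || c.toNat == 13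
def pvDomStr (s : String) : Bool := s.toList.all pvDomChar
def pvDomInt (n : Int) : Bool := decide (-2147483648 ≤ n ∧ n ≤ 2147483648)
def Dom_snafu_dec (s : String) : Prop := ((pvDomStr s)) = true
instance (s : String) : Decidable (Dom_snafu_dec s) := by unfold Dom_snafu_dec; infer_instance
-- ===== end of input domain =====

-- B replaces A's reversed scan with per-position powers 5**i by a forward Horner scan
-- (n = n*5 + digit) with a table lookup; objective: alternative algorithm, same result.

-- ===== PORT A =====
-- A: n = 0; for i, c in enumerate(s[::-1]): match c: … n ± 5**i [* 2] …; return n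
def snafu_dec (s : String) : Int :=
  (PySem.List.enumerate ((PySem.Str.slice? s none none (-1)).getD "").toList).foldl
    (fun n ic =>
      match ic.2 with
      | '2' => n + 5 ^ ic.1.toNat * 2
      | '1' => n + 5 ^ ic.1.toNat
      | '0' => n
      | '-' => n - 5 ^ ic.1.toNat
      | '=' => n - 5 ^ ic.1.toNat * 2
      | _ => n) 0

-- ===== PORT B =====
-- SNAFU_DIGITS.get(c, 0) ported as a match on the same five keys with default 0
def snafuDigitGet (c : Char) : Int :=
  match c with
  | '2' => 2
  | '1' => 1
  | '0' => 0
  | '-' => -1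
  | '=' => -2
  | _ => 0

-- B: n = 0; for c in s: n = n * 5 + SNAFU_DIGITS.get(c, 0); return n
def snafu_dec_alt (s : String) : Int :=
  s.toList.foldl (fun n c => n * 5 + snafuDigitGet c) 0

-- ===== PRECONDITION & SPEC =====
def Spec_snafu_dec (s : String) (out : Int) : Prop := out = snafu_dec_alt s
instance (s : String) (out : Int) : Decidable (Spec_snafu_dec s out) := by unfold Spec_snafu_dec; infer_instance

-- ===== CLAIM (what is proved, stated in full; the proofs are below) =====
def Claim_equal_snafu_dec : Prop := ∀ (s : String), Dom_snafu_dec s → Spec_snafu_dec s (snafu_dec s)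

-- ===== LEMMAS AND PROOFS =====

-- Horner with an arbitrary accumulator
theorem pv_horner_shift (l : List Char) (n : Int) :
    l.foldl (fun n c => n * 5 + snafuDigitGet c) n
      = n * 5 ^ l.length + l.foldl (fun n c => n * 5 + snafuDigitGet c) 0 := by
  induction l generalizing n with
  | nil => simp
  | cons c l ih =>
    simp only [List.foldl_cons, List.length_cons]
    rw [ih (n * 5 + snafuDigitGet c), ih (0 * 5 + snafuDigitGet c)]
    ring

-- A's fold over the reversed, enumerated list equals B's Horner fold
theorem pv_afold_eq_horner (l : List Char) (n : Int) :
    (PySem.List.enumerate l.reverse).foldl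
      (fun n ic =>
        match ic.2 with
        | '2' => n + 5 ^ ic.1.toNat * 2
        | '1' => n + 5 ^ ic.1.toNat
        | '0' => n
        | '-' => n - 5 ^ ic.1.toNat
        | '=' => n - 5 ^ ic.1.toNat * 2
        | _ => n) n
      = n + l.foldl (fun n c => n * 5 + snafuDigitGet c) 0 := by
  induction l generalizing n with
  | nil => simp [PySem.List.enumerate_nil]
  | cons c l ih =>
    simp only [List.reverse_cons, PySem.List.enumerate_append, List.foldl_append, ih,
      PySem.List.enumerate_cons, PySem.List.enumerate_nil, List.foldl_cons, List.foldl_nil]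
    rw [pv_horner_shift l (0 * 5 + snafuDigitGet c)]
    simp only [List.length_reverse, zero_add, Int.toNat_natCast]
    unfold snafuDigitGet
    split <;> ring

-- ===== VERDICT (by name: the statement is the Claim_ definition above) =====
theorem snafu_dec_spec : Claim_equal_snafu_dec := by
  intro s _
  show snafu_dec s = snafu_dec_alt s
  unfold snafu_dec snafu_dec_alt
  rw [PySem.Str.slice?_none_none_neg_one]
  simpa using pv_afold_eq_horner s.toList 0
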